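-- pv_equiv track=rewrite | github.com/Fleaurent/AdventOfCode2020 | Day_5/binary_boarding.py | decode_column
-- ===== SOURCE A (Python) =====
-- def decode_column(column: str) -> int:
--     '''The last three characters will be either L or R;
--     these specify exactly one of the 8 columns of seats on the plane
--     L == Lower half
--     R == Upper half'''
--     column_min = 0
--     column_max = 7
--     for i in column.strip():
--         if i == "L":
--             column_max -= ((column_max - column_min + 1) // 2)
--         elif i == "R":
--             column_min += (column_max - column_min + 1) // 2
--     return column_min
-- ===== SOURCE B (Python) =====
-- def decode_column(column: str) -> int:
--     '''Read the first three L/R characters as binary (R=1), shifted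
--     into the high bits if fewer than three are present.'''
--     bits = [c for c in column.strip() if c in "LR"][:3]
--     value = 0
--     for c in bits:
--         value = 2 * value + (c == "R")
--     return value << (3 - len(bits))
-- ===== Notes on version B (the rewrite author's own statement) =====
-- stated objective: alternative
-- what changed: Replaces the shrinking [min,max] interval bisection over every character by filtering out the first three L/R characters, reading them as a binary number (R=1), and left-shifting for missing bits; other characters and extra L/R characters provably cannot change the result.
import Mathlib
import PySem

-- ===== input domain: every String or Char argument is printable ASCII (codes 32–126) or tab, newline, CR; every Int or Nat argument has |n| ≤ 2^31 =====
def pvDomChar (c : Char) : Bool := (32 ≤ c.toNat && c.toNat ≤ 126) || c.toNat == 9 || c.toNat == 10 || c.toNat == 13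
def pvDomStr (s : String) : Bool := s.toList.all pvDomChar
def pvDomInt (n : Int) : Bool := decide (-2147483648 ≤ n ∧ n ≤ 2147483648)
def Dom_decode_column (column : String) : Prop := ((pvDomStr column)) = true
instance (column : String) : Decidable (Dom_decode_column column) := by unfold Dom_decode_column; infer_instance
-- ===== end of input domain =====

-- B replaces A's interval bisection over every character by: filter to the first three
-- L/R characters, read them as a binary number (R=1), shift for missing bits (alternative; same cost).

-- ===== PORT A =====
-- one step of A's loop over the stripped string: state (column_min, column_max)
def decode_column_stepA (p : Int × Int) (i : Char) : Int × Int :=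
  if i = 'L' then (p.1, p.2 - PySem.Int.floordiv (p.2 - p.1 + 1) 2)
  else if i = 'R' then (p.1 + PySem.Int.floordiv (p.2 - p.1 + 1) 2, p.2)
  else p

def decode_column (column : String) : Int :=
  ((PySem.Str.strip column).toList.foldl decode_column_stepA (0, 7)).1

-- ===== PORT B =====
-- Source B's loop body: value = 2*value + (c == "R")
def pvBit (acc : Int) (c : Char) : Int := 2 * acc + (if c = 'R' then 1 else 0)

def decode_column_alt (column : String) : Int :=
  let bits := ((PySem.Str.strip column).toList.filter (fun c => c == 'L' || c == 'R')).take 3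
  (bits.foldl pvBit 0) * 2 ^ (3 - bits.length)

-- ===== PRECONDITION & SPEC =====
def Spec_decode_column (column : String) (out : Int) : Prop := out = decode_column_alt column
instance (column : String) (out : Int) : Decidable (Spec_decode_column column out) := by unfold Spec_decode_column; infer_instance

-- ===== CLAIM =====
def Claim_equal_decode_column : Prop := ∀ (column : String), Dom_decode_column column → Spec_decode_column column (decode_column column)

-- ===== LEMMAS AND PROOFS =====

-- A's step ignores characters other than 'L' and 'R', so its fold only sees the filtered list.
theorem pv_foldA_filter (l : List Char) (p : Int × Int) :
    l.foldl decode_column_stepA p =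
      (l.filter (fun c => c == 'L' || c == 'R')).foldl decode_column_stepA p := by
  induction l generalizing p with
  | nil => rfl
  | cons c t ih =>
      by_cases hc : (c == 'L' || c == 'R') = true
      · simp only [List.foldl_cons, List.filter_cons, hc, if_pos, ih]
      · have hL : ¬ c = 'L' := by simp at hc; exact fun h => hc.1 (by simp [h])
        have hR : ¬ c = 'R' := by simp at hc; exact fun h => hc.2 (by simp [h])
        simp [hc, decode_column_stepA, hL, hR, List.foldl_cons, ih]

-- shifting the accumulator of B's binary fold
theorem pv_bit_shift (l : List Char) (a : Int) :
    l.foldl pvBit a = a * 2 ^ l.length + l.foldl pvBit 0 := by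
  induction l generalizing a with
  | nil => simp
  | cons c t ih =>
      simp only [List.foldl_cons, List.length_cons]
      rw [ih (pvBit a c), ih (pvBit 0 c)]
      simp only [pvBit]
      ring

-- core invariant: A's fold over an all-L/R list starting from the interval
-- [v, v + 2^m - 1] lands on v plus the binary value of the first m characters,
-- shifted into the high bits when fewer than m are present.
theorem pv_core (l : List Char) (hl : ∀ c ∈ l, c = 'L' ∨ c = 'R') (v : Int) (m : Nat) :
    (l.foldl decode_column_stepA (v, v + 2 ^ m - 1)).1 =
      v + ((l.take m).foldl pvBit 0) * 2 ^ (m - (l.take m).length) := by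
  induction l generalizing v m with
  | nil => simp
  | cons c t ih =>
      have ht : ∀ c ∈ t, c = 'L' ∨ c = 'R' := fun x hx => hl x (List.mem_cons_of_mem _ hx)
      cases m with
      | zero =>
          -- width-1 interval: the step is a no-op for both 'L' and 'R'
          have hstep : decode_column_stepA (v, v + 2 ^ 0 - 1) c = (v, v + 2 ^ 0 - 1) := by
            rcases hl c List.mem_cons_self with h | h <;>
              simp [decode_column_stepA, h, PySem.Int.floordiv]
          simp only [List.foldl_cons, hstep, List.take_zero] at *
          simpa using ih ht v 0
      | succ k =>
          have hfd : PySem.Int.floordiv ((v + 2 ^ (k + 1) - 1) - v + 1) 2 = 2 ^ k := by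
            have e1 : (v + 2 ^ (k + 1) - 1) - v + 1 = 2 ^ k * 2 := by ring
            rw [e1, PySem.Int.floordiv_eq_ediv_of_pos (by norm_num)]
            exact Int.mul_ediv_cancel _ (by norm_num)
          have hlen : (t.take k).length ≤ k := by
            exact List.length_take_le k t
          have hexp : k + 1 - ((t.take k).length + 1) = k - (t.take k).length := by omega
          have hpow : (2 : Int) ^ (t.take k).length * 2 ^ (k - (t.take k).length) = 2 ^ k := by
            rw [← pow_add, Nat.add_sub_cancel' hlen]
          rcases hl c List.mem_cons_self with h | h <;> subst h
          · -- 'L': interval becomes [v, v + 2^k - 1]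
            have hstep : decode_column_stepA (v, v + 2 ^ (k + 1) - 1) 'L' = (v, v + 2 ^ k - 1) := by
              unfold decode_column_stepA
              rw [if_pos rfl]
              dsimp only
              rw [hfd, Prod.mk.injEq]
              exact ⟨rfl, by ring⟩
            have hbit : pvBit 0 'L' = 0 := by simp [pvBit]
            simp only [List.foldl_cons, hstep, ih ht v k, List.take_succ_cons,
              List.length_cons, hbit, hexp]
          · -- 'R': interval becomes [v + 2^k, v + 2^(k+1) - 1]
            have hstep : decode_column_stepA (v, v + 2 ^ (k + 1) - 1) 'R' =
                (v + 2 ^ k, (v + 2 ^ k) + 2 ^ k - 1) := by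
              unfold decode_column_stepA
              rw [if_neg (by decide), if_pos rfl]
              dsimp only
              rw [hfd, Prod.mk.injEq]
              exact ⟨rfl, by ring⟩
            have hbit : pvBit 0 'R' = 1 := by simp [pvBit]
            simp only [List.foldl_cons, hstep, ih ht (v + 2 ^ k) k, List.take_succ_cons,
              List.length_cons, hexp]
            rw [pv_bit_shift (t.take k) (pvBit 0 'R'), hbit, one_mul, add_mul, hpow]
            ring

-- ===== VERDICT =====
theorem decode_column_spec : Claim_equal_decode_column := by
  intro column _
  unfold Spec_decode_column decode_column decode_column_alt
  rw [pv_foldA_filter]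
  have hLR : ∀ c ∈ (PySem.Str.strip column).toList.filter (fun c => c == 'L' || c == 'R'),
      c = 'L' ∨ c = 'R' := by
    intro c hc
    have := List.of_mem_filter hc
    rcases Bool.or_eq_true_iff.mp this with h | h
    · exact Or.inl (by simpa using h)
    · exact Or.inr (by simpa using h)
  have h7 : ((0 : Int), (7 : Int)) = ((0 : Int), (0 : Int) + 2 ^ 3 - 1) := by norm_num
  rw [h7, pv_core _ hLR 0 3]
  simp
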